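/- GENERATED by farm/mkstatement.py from design/units.split.tsv — do not edit.
   THE SPLIT of the proof unit `start_decoder.C2` into `start_decoder.C2a`, `start_decoder.C2b`, `start_decoder.C2c`, `start_decoder.C2d`: the children's statements give the parent's
   UNCHANGED statement (so nothing above the parent — callers, compositions — is touched by the split). -/
import Vorbis.Spec.StartDecoderC2
import Vorbis.Spec.Units.start_decoder_C2
import Vorbis.Spec.Units.start_decoder_C2a
import Vorbis.Spec.Units.start_decoder_C2b
import Vorbis.Spec.Units.start_decoder_C2c
import Vorbis.Spec.Units.start_decoder_C2d
namespace Vorbis.Spec.Splits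
open X86 X86.User Asan

/-- The children of the split unit `start_decoder.C2` prove it, by `Vorbis.Spec.StartDecoder.SegC2.of_parts`. -/
theorem start_decoder_C2
    (h_start_decoder_C2a : Vorbis.Spec.start_decoder_C2a.Statement)
    (h_start_decoder_C2b : Vorbis.Spec.start_decoder_C2b.Statement)
    (h_start_decoder_C2c : Vorbis.Spec.start_decoder_C2c.Statement)
    (h_start_decoder_C2d : Vorbis.Spec.start_decoder_C2d.Statement) :
    Vorbis.Spec.start_decoder_C2.Statement := by
  intro Lay _hLay μ _hμ u₀ _hcode _h_asan_load4_noabort _h_asan_load8_noabort _h_get_bits _h_asan_store4_noabort _h_asan_store1_noabort _h_setup_temp_malloc _h_error _h_setup_malloc _h_asan_store8_noabort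
  apply Vorbis.Spec.StartDecoder.SegC2.of_parts
  · exact h_start_decoder_C2a Lay _hLay μ _hμ u₀ _hcode _h_asan_load4_noabort _h_asan_load8_noabort _h_get_bits _h_asan_store4_noabort _h_error
  · exact h_start_decoder_C2b Lay _hLay μ _hμ u₀ _hcode _h_asan_load4_noabort _h_get_bits _h_asan_store1_noabort _h_setup_temp_malloc _h_error _h_setup_malloc
  · exact h_start_decoder_C2c Lay _hLay μ _hμ u₀ _hcode _h_error
  · exact h_start_decoder_C2d Lay _hLay μ _hμ u₀ _hcode _h_error _h_asan_store8_noabort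

end Vorbis.Spec.Splits
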